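-- pv_equiv track=rewrite | github.com/Selmalico/olap-project | backend/agents/visualization_agent.py | _pick_x_axis
-- ===== SOURCE A (Python) =====
-- def _pick_x_axis(cols: list[str], operation: str) -> str:
--     """Choose the most appropriate x-axis field."""
--     time_cols = ["month_name", "month", "quarter", "year"]
--     for tc in time_cols:
--         if tc in cols:
--             return tc
--     for candidate in ["group_dim", "region", "country", "category",
--                       "subcategory", "customer_segment", "row_dim"]:
--         if candidate in cols:
--             return candidate
--     return cols[0] if cols else "label"
-- ===== SOURCE B (Python) =====
-- def _pick_x_axis(cols: list[str], operation: str) -> str: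
--     """Choose the most appropriate x-axis field."""
--     preferred = ["month_name", "month", "quarter", "year",
--                  "group_dim", "region", "country", "category",
--                  "subcategory", "customer_segment", "row_dim"]
--     rank = {name: i for i, name in enumerate(preferred)}
--     best = None
--     best_rank = None
--     for col in cols:
--         r = rank.get(col)
--         if r is not None and (best_rank is None or r < best_rank):
--             best, best_rank = col, r
--     if best is not None:
--         return best
--     return cols[0] if cols else "label"
-- ===== Notes on version B (the rewrite author's own statement) =====
-- stated objective: faster
-- what changed: Replaced A's two sequential scans over fixed candidate lists (each doing a linear membership test on cols) by a rank dict over the preferred names and a single pass over cols keeping the column with the minimum rank.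
import Mathlib
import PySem

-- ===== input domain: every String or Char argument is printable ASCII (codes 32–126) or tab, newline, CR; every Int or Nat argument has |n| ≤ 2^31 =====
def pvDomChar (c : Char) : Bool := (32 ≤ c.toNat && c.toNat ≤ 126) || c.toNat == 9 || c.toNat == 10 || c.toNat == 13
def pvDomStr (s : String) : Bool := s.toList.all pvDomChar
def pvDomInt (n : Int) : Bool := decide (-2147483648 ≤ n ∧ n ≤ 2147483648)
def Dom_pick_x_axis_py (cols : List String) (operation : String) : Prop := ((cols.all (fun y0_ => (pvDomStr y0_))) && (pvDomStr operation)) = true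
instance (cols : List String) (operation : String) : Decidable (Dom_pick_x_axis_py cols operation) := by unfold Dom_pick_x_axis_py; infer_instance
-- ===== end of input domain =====

-- B replaces A's two scans over fixed candidate lists by one pass over `cols` keeping the
-- column of minimum priority rank (timing run measured B faster at large n; same result).

-- shared rendering of the Python expression `cols[0] if cols else "label"` (present in both A and B)
def pvFallback (cols : List String) : String :=
  match cols with
  | [] => "label"
  | c :: _ => c

-- ===== PORT A =====
-- `for tc in cands: if tc in cols: return tc` as structural recursion over the candidate list
def pvFirstIn : List String → List String → Option String
  | [], _ => none
  | c :: rest, cols => if c ∈ cols then some c else pvFirstIn rest cols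

def pick_x_axis_py (cols : List String) (operation : String) : String :=
  match pvFirstIn ["month_name", "month", "quarter", "year"] cols with
  | some tc => tc
  | none =>
    match pvFirstIn ["group_dim", "region", "country", "category",
                     "subcategory", "customer_segment", "row_dim"] cols with
    | some candidate => candidate
    | none => pvFallback cols

-- ===== PORT B =====
def pvPreferred : List String :=
  ["month_name", "month", "quarter", "year",
   "group_dim", "region", "country", "category",
   "subcategory", "customer_segment", "row_dim"]

-- `rank = {name: i for i, name in enumerate(preferred)}`
def pvRank : PySem.Dict String Int :=
  (PySem.List.enumerate pvPreferred).foldl (fun d p => d.insert p.2 p.1) PySem.Dict.empty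

-- loop body: keep the column with the smallest rank seen so far
def pvStep (s : Option (String × Int)) (col : String) : Option (String × Int) :=
  match pvRank.get? col with
  | none => s
  | some r =>
    match s with
    | none => some (col, r)
    | some (_, br) => if r < br then some (col, r) else s

def pick_x_axis_py_alt (cols : List String) (operation : String) : String :=
  match cols.foldl pvStep none with
  | some (b, _) => b
  | none => pvFallback cols

-- ===== PRECONDITION & SPEC =====
def Spec_pick_x_axis_py (cols : List String) (operation : String) (out : String) : Prop := out = pick_x_axis_py_alt cols operation
instance (cols : List String) (operation : String) (out : String) : Decidable (Spec_pick_x_axis_py cols operation out) := by unfold Spec_pick_x_axis_py; infer_instance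

-- ===== CLAIM (what is proved, stated in full; the proofs are below) =====
def Claim_equal_pick_x_axis_py : Prop := ∀ (cols : List String) (operation : String), Dom_pick_x_axis_py cols operation → Spec_pick_x_axis_py cols operation (pick_x_axis_py cols operation)

-- ===== LEMMAS AND PROOFS =====
set_option maxHeartbeats 1000000

-- the rank dict, spelled out
lemma pvRank_eq : pvRank = PySem.Dict.mk
    [("month_name", 0), ("month", 1), ("quarter", 2), ("year", 3),
     ("group_dim", 4), ("region", 5), ("country", 6), ("category", 7),
     ("subcategory", 8), ("customer_segment", 9), ("row_dim", 10)] := by rfl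

lemma rkF_cases (c : String) (r : Int) (h : pvRank.get? c = some r) :
    (c = "month_name" ∧ r = 0) ∨ (c = "month" ∧ r = 1) ∨ (c = "quarter" ∧ r = 2) ∨
    (c = "year" ∧ r = 3) ∨ (c = "group_dim" ∧ r = 4) ∨ (c = "region" ∧ r = 5) ∨
    (c = "country" ∧ r = 6) ∨ (c = "category" ∧ r = 7) ∨ (c = "subcategory" ∧ r = 8) ∨
    (c = "customer_segment" ∧ r = 9) ∨ (c = "row_dim" ∧ r = 10) := by
  rw [pvRank_eq] at h
  simp only [PySem.Dict.get?_mk_cons, beq_iff_eq] at h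
  split_ifs at h <;> first | simp_all | simp [PySem.Dict.get?] at h

lemma rkF_inj (c c' : String) (r : Int) (h : pvRank.get? c = some r)
    (h' : pvRank.get? c' = some r) : c = c' := by
  rcases rkF_cases c r h with ⟨hc,hr⟩|⟨hc,hr⟩|⟨hc,hr⟩|⟨hc,hr⟩|⟨hc,hr⟩|⟨hc,hr⟩|⟨hc,hr⟩|⟨hc,hr⟩|⟨hc,hr⟩|⟨hc,hr⟩|⟨hc,hr⟩ <;>
    rcases rkF_cases c' r h' with ⟨hc',hr'⟩|⟨hc',hr'⟩|⟨hc',hr'⟩|⟨hc',hr'⟩|⟨hc',hr'⟩|⟨hc',hr'⟩|⟨hc',hr'⟩|⟨hc',hr'⟩|⟨hc',hr'⟩|⟨hc',hr'⟩|⟨hc',hr'⟩ <;>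
    simp_all

-- A's result characterised: either no preferred column occurs in cols (and A falls back),
-- or A returns a member of cols whose rank is minimal among the ranked members of cols.
lemma A_spec (cols : List String) (operation : String) :
    (pick_x_axis_py cols operation = pvFallback cols ∧ ∀ c ∈ cols, pvRank.get? c = none) ∨
    (∃ p rp, pick_x_axis_py cols operation = p ∧ pvRank.get? p = some rp ∧ p ∈ cols ∧
       ∀ c ∈ cols, ∀ r, pvRank.get? c = some r → rp ≤ r) := by
  by_cases h1 : "month_name" ∈ cols
  · refine Or.inr ⟨"month_name", 0, ?_, rfl, h1, ?_⟩
    · simp [pick_x_axis_py, pvFirstIn, h1]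
    · intro c hc r hr
      rcases rkF_cases c r hr with ⟨rfl,rfl⟩|⟨rfl,rfl⟩|⟨rfl,rfl⟩|⟨rfl,rfl⟩|⟨rfl,rfl⟩|⟨rfl,rfl⟩|⟨rfl,rfl⟩|⟨rfl,rfl⟩|⟨rfl,rfl⟩|⟨rfl,rfl⟩|⟨rfl,rfl⟩ <;> first | omega | simp_all
  by_cases h2 : "month" ∈ cols
  · refine Or.inr ⟨"month", 1, ?_, rfl, h2, ?_⟩
    · simp [pick_x_axis_py, pvFirstIn, h1, h2]
    · intro c hc r hr
      rcases rkF_cases c r hr with ⟨rfl,rfl⟩|⟨rfl,rfl⟩|⟨rfl,rfl⟩|⟨rfl,rfl⟩|⟨rfl,rfl⟩|⟨rfl,rfl⟩|⟨rfl,rfl⟩|⟨rfl,rfl⟩|⟨rfl,rfl⟩|⟨rfl,rfl⟩|⟨rfl,rfl⟩ <;> first | omega | simp_all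
  by_cases h3 : "quarter" ∈ cols
  · refine Or.inr ⟨"quarter", 2, ?_, rfl, h3, ?_⟩
    · simp [pick_x_axis_py, pvFirstIn, h1, h2, h3]
    · intro c hc r hr
      rcases rkF_cases c r hr with ⟨rfl,rfl⟩|⟨rfl,rfl⟩|⟨rfl,rfl⟩|⟨rfl,rfl⟩|⟨rfl,rfl⟩|⟨rfl,rfl⟩|⟨rfl,rfl⟩|⟨rfl,rfl⟩|⟨rfl,rfl⟩|⟨rfl,rfl⟩|⟨rfl,rfl⟩ <;> first | omega | simp_all
  by_cases h4 : "year" ∈ cols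
  · refine Or.inr ⟨"year", 3, ?_, rfl, h4, ?_⟩
    · simp [pick_x_axis_py, pvFirstIn, h1, h2, h3, h4]
    · intro c hc r hr
      rcases rkF_cases c r hr with ⟨rfl,rfl⟩|⟨rfl,rfl⟩|⟨rfl,rfl⟩|⟨rfl,rfl⟩|⟨rfl,rfl⟩|⟨rfl,rfl⟩|⟨rfl,rfl⟩|⟨rfl,rfl⟩|⟨rfl,rfl⟩|⟨rfl,rfl⟩|⟨rfl,rfl⟩ <;> first | omega | simp_all
  by_cases h5 : "group_dim" ∈ cols
  · refine Or.inr ⟨"group_dim", 4, ?_, rfl, h5, ?_⟩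
    · simp [pick_x_axis_py, pvFirstIn, h1, h2, h3, h4, h5]
    · intro c hc r hr
      rcases rkF_cases c r hr with ⟨rfl,rfl⟩|⟨rfl,rfl⟩|⟨rfl,rfl⟩|⟨rfl,rfl⟩|⟨rfl,rfl⟩|⟨rfl,rfl⟩|⟨rfl,rfl⟩|⟨rfl,rfl⟩|⟨rfl,rfl⟩|⟨rfl,rfl⟩|⟨rfl,rfl⟩ <;> first | omega | simp_all
  by_cases h6 : "region" ∈ cols
  · refine Or.inr ⟨"region", 5, ?_, rfl, h6, ?_⟩
    · simp [pick_x_axis_py, pvFirstIn, h1, h2, h3, h4, h5, h6]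
    · intro c hc r hr
      rcases rkF_cases c r hr with ⟨rfl,rfl⟩|⟨rfl,rfl⟩|⟨rfl,rfl⟩|⟨rfl,rfl⟩|⟨rfl,rfl⟩|⟨rfl,rfl⟩|⟨rfl,rfl⟩|⟨rfl,rfl⟩|⟨rfl,rfl⟩|⟨rfl,rfl⟩|⟨rfl,rfl⟩ <;> first | omega | simp_all
  by_cases h7 : "country" ∈ cols
  · refine Or.inr ⟨"country", 6, ?_, rfl, h7, ?_⟩
    · simp [pick_x_axis_py, pvFirstIn, h1, h2, h3, h4, h5, h6, h7]
    · intro c hc r hr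
      rcases rkF_cases c r hr with ⟨rfl,rfl⟩|⟨rfl,rfl⟩|⟨rfl,rfl⟩|⟨rfl,rfl⟩|⟨rfl,rfl⟩|⟨rfl,rfl⟩|⟨rfl,rfl⟩|⟨rfl,rfl⟩|⟨rfl,rfl⟩|⟨rfl,rfl⟩|⟨rfl,rfl⟩ <;> first | omega | simp_all
  by_cases h8 : "category" ∈ cols
  · refine Or.inr ⟨"category", 7, ?_, rfl, h8, ?_⟩
    · simp [pick_x_axis_py, pvFirstIn, h1, h2, h3, h4, h5, h6, h7, h8]
    · intro c hc r hr
      rcases rkF_cases c r hr with ⟨rfl,rfl⟩|⟨rfl,rfl⟩|⟨rfl,rfl⟩|⟨rfl,rfl⟩|⟨rfl,rfl⟩|⟨rfl,rfl⟩|⟨rfl,rfl⟩|⟨rfl,rfl⟩|⟨rfl,rfl⟩|⟨rfl,rfl⟩|⟨rfl,rfl⟩ <;> first | omega | simp_all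
  by_cases h9 : "subcategory" ∈ cols
  · refine Or.inr ⟨"subcategory", 8, ?_, rfl, h9, ?_⟩
    · simp [pick_x_axis_py, pvFirstIn, h1, h2, h3, h4, h5, h6, h7, h8, h9]
    · intro c hc r hr
      rcases rkF_cases c r hr with ⟨rfl,rfl⟩|⟨rfl,rfl⟩|⟨rfl,rfl⟩|⟨rfl,rfl⟩|⟨rfl,rfl⟩|⟨rfl,rfl⟩|⟨rfl,rfl⟩|⟨rfl,rfl⟩|⟨rfl,rfl⟩|⟨rfl,rfl⟩|⟨rfl,rfl⟩ <;> first | omega | simp_all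
  by_cases h10 : "customer_segment" ∈ cols
  · refine Or.inr ⟨"customer_segment", 9, ?_, rfl, h10, ?_⟩
    · simp [pick_x_axis_py, pvFirstIn, h1, h2, h3, h4, h5, h6, h7, h8, h9, h10]
    · intro c hc r hr
      rcases rkF_cases c r hr with ⟨rfl,rfl⟩|⟨rfl,rfl⟩|⟨rfl,rfl⟩|⟨rfl,rfl⟩|⟨rfl,rfl⟩|⟨rfl,rfl⟩|⟨rfl,rfl⟩|⟨rfl,rfl⟩|⟨rfl,rfl⟩|⟨rfl,rfl⟩|⟨rfl,rfl⟩ <;> first | omega | simp_all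
  by_cases h11 : "row_dim" ∈ cols
  · refine Or.inr ⟨"row_dim", 10, ?_, rfl, h11, ?_⟩
    · simp [pick_x_axis_py, pvFirstIn, h1, h2, h3, h4, h5, h6, h7, h8, h9, h10, h11]
    · intro c hc r hr
      rcases rkF_cases c r hr with ⟨rfl,rfl⟩|⟨rfl,rfl⟩|⟨rfl,rfl⟩|⟨rfl,rfl⟩|⟨rfl,rfl⟩|⟨rfl,rfl⟩|⟨rfl,rfl⟩|⟨rfl,rfl⟩|⟨rfl,rfl⟩|⟨rfl,rfl⟩|⟨rfl,rfl⟩ <;> first | omega | simp_all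
  refine Or.inl ⟨?_, ?_⟩
  · simp [pick_x_axis_py, pvFirstIn, h1, h2, h3, h4, h5, h6, h7, h8, h9, h10, h11]
  · intro c hc
    cases hgc : pvRank.get? c with
    | none => rfl
    | some r =>
      rcases rkF_cases c r hgc with ⟨rfl,rfl⟩|⟨rfl,rfl⟩|⟨rfl,rfl⟩|⟨rfl,rfl⟩|⟨rfl,rfl⟩|⟨rfl,rfl⟩|⟨rfl,rfl⟩|⟨rfl,rfl⟩|⟨rfl,rfl⟩|⟨rfl,rfl⟩|⟨rfl,rfl⟩ <;> simp_all

-- the fold, started from an already-ranked best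
lemma fold_some (cols : List String) (b : String) (br : Int) (hb : pvRank.get? b = some br) :
    ∃ b2 br2, cols.foldl pvStep (some (b, br)) = some (b2, br2) ∧ pvRank.get? b2 = some br2 ∧
      ((b2 = b ∧ br2 = br) ∨ b2 ∈ cols) ∧ br2 ≤ br ∧
      ∀ c ∈ cols, ∀ r, pvRank.get? c = some r → br2 ≤ r := by
  induction cols generalizing b br with
  | nil => exact ⟨b, br, rfl, hb, Or.inl ⟨rfl, rfl⟩, le_refl _, by simp⟩
  | cons c cs ih =>
    simp only [List.foldl_cons]
    cases hgc : pvRank.get? c with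
    | none =>
      simp only [pvStep, hgc]
      obtain ⟨b2, br2, h, hrk, hmem, hle, hmin⟩ := ih b br hb
      refine ⟨b2, br2, h, hrk, ?_, hle, ?_⟩
      · rcases hmem with h' | h'
        · exact Or.inl h'
        · exact Or.inr (List.mem_cons_of_mem _ h')
      · intro x hx r hr
        rcases List.mem_cons.mp hx with rfl | hx'
        · rw [hgc] at hr; exact absurd hr (by simp)
        · exact hmin x hx' r hr
    | some r =>
      simp only [pvStep, hgc]
      by_cases hlt : r < br
      · rw [if_pos hlt]
        obtain ⟨b2, br2, h, hrk, hmem, hle, hmin⟩ := ih c r hgc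
        refine ⟨b2, br2, h, hrk, ?_, by omega, ?_⟩
        · rcases hmem with ⟨rfl, rfl⟩ | h'
          · exact Or.inr (List.mem_cons_self)
          · exact Or.inr (List.mem_cons_of_mem _ h')
        · intro x hx r' hr'
          rcases List.mem_cons.mp hx with rfl | hx'
          · rw [hgc] at hr'; injection hr' with e; omega
          · exact hmin x hx' r' hr'
      · rw [if_neg hlt]
        obtain ⟨b2, br2, h, hrk, hmem, hle, hmin⟩ := ih b br hb
        refine ⟨b2, br2, h, hrk, ?_, hle, ?_⟩
        · rcases hmem with h' | h'
          · exact Or.inl h'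
          · exact Or.inr (List.mem_cons_of_mem _ h')
        · intro x hx r' hr'
          rcases List.mem_cons.mp hx with rfl | hx'
          · rw [hgc] at hr'; injection hr' with e; omega
          · exact hmin x hx' r' hr'

lemma fold_none (cols : List String) :
    (cols.foldl pvStep none = none ∧ ∀ c ∈ cols, pvRank.get? c = none) ∨
    (∃ b br, cols.foldl pvStep none = some (b, br) ∧ pvRank.get? b = some br ∧ b ∈ cols ∧
       ∀ c ∈ cols, ∀ r, pvRank.get? c = some r → br ≤ r) := by
  induction cols with
  | nil => exact Or.inl ⟨rfl, by simp⟩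
  | cons c cs ih =>
    simp only [List.foldl_cons]
    cases hgc : pvRank.get? c with
    | none =>
      simp only [pvStep, hgc]
      rcases ih with ⟨h, hall⟩ | ⟨b, br, h, hrk, hmem, hmin⟩
      · refine Or.inl ⟨h, ?_⟩
        intro x hx
        rcases List.mem_cons.mp hx with rfl | hx'
        · exact hgc
        · exact hall x hx'
      · refine Or.inr ⟨b, br, h, hrk, List.mem_cons_of_mem _ hmem, ?_⟩
        intro x hx r hr
        rcases List.mem_cons.mp hx with rfl | hx'
        · rw [hgc] at hr; exact absurd hr (by simp)
        · exact hmin x hx' r hr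
    | some r =>
      simp only [pvStep, hgc]
      obtain ⟨b2, br2, h, hrk, hmem, hle, hmin⟩ := fold_some cs c r hgc
      refine Or.inr ⟨b2, br2, h, hrk, ?_, ?_⟩
      · rcases hmem with ⟨rfl, _⟩ | h'
        · exact List.mem_cons_self
        · exact List.mem_cons_of_mem _ h'
      · intro x hx r' hr'
        rcases List.mem_cons.mp hx with rfl | hx'
        · rw [hgc] at hr'; injection hr' with e; omega
        · exact hmin x hx' r' hr'

-- ===== VERDICT (by name: the statement is the Claim_ definition above) =====
theorem pick_x_axis_py_spec : Claim_equal_pick_x_axis_py := by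
  intro cols operation _
  unfold Spec_pick_x_axis_py pick_x_axis_py_alt
  rcases fold_none cols with ⟨hfold, hall⟩ | ⟨b, br, hfold, hrkb, hb, hmin⟩
  · rw [hfold]
    rcases A_spec cols operation with ⟨hA, _⟩ | ⟨p, rp, hA, hrkp, hp, _⟩
    · exact hA
    · rw [hall p hp] at hrkp; exact absurd hrkp (by simp)
  · rw [hfold]
    rcases A_spec cols operation with ⟨_, hall⟩ | ⟨p, rp, hA, hrkp, hp, hminA⟩
    · rw [hall b hb] at hrkb; exact absurd hrkb (by simp)
    · have h1 : rp ≤ br := hminA b hb br hrkb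
      have h2 : br ≤ rp := hmin p hp rp hrkp
      have : rp = br := le_antisymm h1 h2
      subst this
      rw [hA]
      exact rkF_inj p b rp hrkp hrkb
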